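-- pv_equiv track=rewrite | github.com/Marastraluster/CrossDesert | code/problem3_monte_carlo.py | next_step_towards
-- ===== SOURCE A (Python) =====
-- def node_rc(node):
--     r = (node - 1) // 5
--     c = (node - 1) % 5
--     return r, c
--
-- def manhattan(n1, n2):
--     r1, c1 = node_rc(n1)
--     r2, c2 = node_rc(n2)
--     return abs(r1 - r2) + abs(c1 - c2)
--
-- def is_adj(n1, n2):
--     if n1 == n2:
--         return True
--     return manhattan(n1, n2) == 1
--
-- def neighbors(node):
--     return [j for j in range(1, 26) if is_adj(node, j) and j != node]
--
-- def next_step_towards(cur, target, forbidden_targets=None):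
--     """
--     返回朝 target 前进的一步，若有多个最优邻居，尽量避开 forbidden_targets
--     """
--     if forbidden_targets is None:
--         forbidden_targets = set()
--
--     cands = neighbors(cur)
--     cands.sort(key=lambda x: manhattan(x, target))
--
--     # 先选不冲突的
--     for nb in cands:
--         if nb not in forbidden_targets:
--             return nb
--
--     # 实在避不开就选最近的
--     return cands[0] if cands else cur
-- ===== SOURCE B (Python) =====
-- def node_rc(node):
--     r = (node - 1) // 5
--     c = (node - 1) % 5
--     return r, c
--
-- def manhattan(n1, n2):
--     r1, c1 = node_rc(n1)
--     r2, c2 = node_rc(n2)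
--     return abs(r1 - r2) + abs(c1 - c2)
--
-- def next_step_towards(cur, target, forbidden_targets=None):
--     # Single fused pass over the 25 grid nodes: no neighbor list, no sort, no scan.
--     # Track the best (distance, node) pair among allowed neighbors and among all
--     # neighbors; lexicographic comparison reproduces A's stable-sort tie-break.
--     if forbidden_targets is None:
--         forbidden_targets = ()
--     best_ok = None
--     best_any = None
--     for j in range(1, 26):
--         if j == cur or manhattan(cur, j) != 1:
--             continue
--         key = (manhattan(j, target), j)
--         if best_any is None or key < best_any:
--             best_any = key
--         if j not in forbidden_targets and (best_ok is None or key < best_ok):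
--             best_ok = key
--     if best_ok is not None:
--         return best_ok[1]
--     if best_any is not None:
--         return best_any[1]
--     return cur
-- ===== Notes on version B (the rewrite author's own statement) =====
-- stated objective: alternative
-- what changed: Replaces A's three staged passes (build neighbor list, stable sort by distance, scan for first non-forbidden, fall back to head) with one fused loop over the 25 grid nodes that tests adjacency inline and maintains two (distance, node) running-minimum accumulators, one over allowed neighbors and one over all neighbors; no intermediate list or sort is built.
import Mathlib
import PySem

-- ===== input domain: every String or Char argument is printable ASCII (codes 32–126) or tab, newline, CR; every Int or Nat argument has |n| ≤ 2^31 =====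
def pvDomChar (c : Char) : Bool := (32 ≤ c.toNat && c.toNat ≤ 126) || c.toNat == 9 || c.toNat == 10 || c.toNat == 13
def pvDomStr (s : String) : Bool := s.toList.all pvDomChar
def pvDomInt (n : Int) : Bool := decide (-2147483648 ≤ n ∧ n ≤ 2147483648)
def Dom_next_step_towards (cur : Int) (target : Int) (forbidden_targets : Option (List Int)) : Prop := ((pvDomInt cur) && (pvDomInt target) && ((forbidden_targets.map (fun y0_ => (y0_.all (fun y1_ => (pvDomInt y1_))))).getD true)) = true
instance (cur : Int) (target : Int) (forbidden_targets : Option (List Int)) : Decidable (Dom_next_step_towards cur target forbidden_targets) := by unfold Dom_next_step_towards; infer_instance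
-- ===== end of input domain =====

-- B replaces A's staged passes (neighbor list, stable sort, first-non-forbidden scan) with one
-- fused loop over the 25 nodes keeping two (distance, node) running-minimum accumulators.


-- ===== PORT A =====
-- Shared helpers (identical in both Python versions)
def node_rc (node : Int) : Int × Int :=
  (PySem.Int.floordiv (node - 1) 5, PySem.Int.mod (node - 1) 5)

def manhattan (n1 n2 : Int) : Int :=
  let r1 := (node_rc n1).1; let c1 := (node_rc n1).2
  let r2 := (node_rc n2).1; let c2 := (node_rc n2).2
  |r1 - r2| + |c1 - c2|

def is_adj (n1 n2 : Int) : Bool :=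
  if n1 = n2 then true else decide (manhattan n1 n2 = 1)

def neighbors (node : Int) : List Int :=
  (PySem.List.pyRange 1 26 1).filter (fun j => is_adj node j && !(j == node))

-- A: stable sort by distance, scan for first non-forbidden, else first, else cur
def next_step_towards (cur : Int) (target : Int) (forbidden_targets : Option (List Int)) : Int :=
  let fset := forbidden_targets.getD []
  let cands := PySem.List.sorted (neighbors cur) (fun x => manhattan x target) false
  match cands.find? (fun nb => !(fset.contains nb)) with
  | some nb => nb
  | none => if h : cands = [] then cur else cands.head h

-- ===== PORT B =====
-- B: one fused loop over range(1,26), adjacency tested inline, two running-minimum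
-- accumulators ((distance, node), Python's lexicographic tuple '<').
def next_step_towards_alt (cur : Int) (target : Int) (forbidden_targets : Option (List Int)) : Int :=
  let fset := forbidden_targets.getD []
  let res := (PySem.List.pyRange 1 26 1).foldl
    (fun (st : Option (Int × Int) × Option (Int × Int)) j =>
      if j == cur || !(manhattan cur j == 1) then st
      else
        let key : Int × Int := (manhattan j target, j)
        let bestAny := match st.2 with
          | none => some key
          | some b => if key.1 < b.1 || (key.1 == b.1 && key.2 < b.2) then some key else some b
        let bestOk := if !(fset.contains j) then
            (match st.1 with
             | none => some key
             | some b => if key.1 < b.1 || (key.1 == b.1 && key.2 < b.2) then some key else some b)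
          else st.1
        (bestOk, bestAny))
    (none, none)
  match res.1 with
  | some b => b.2
  | none => match res.2 with
    | some b => b.2
    | none => cur

-- ===== PRECONDITION & SPEC =====
def Spec_next_step_towards (cur : Int) (target : Int) (forbidden_targets : Option (List Int)) (out : Int) : Prop := out = next_step_towards_alt cur target forbidden_targets
instance (cur : Int) (target : Int) (forbidden_targets : Option (List Int)) (out : Int) : Decidable (Spec_next_step_towards cur target forbidden_targets out) := by unfold Spec_next_step_towards; infer_instance

-- ===== CLAIM (what is proved, stated in full; the proofs are below) =====
def Claim_equal_next_step_towards : Prop := ∀ (cur : Int) (target : Int) (forbidden_targets : Option (List Int)), Dom_next_step_towards cur target forbidden_targets → Spec_next_step_towards cur target forbidden_targets (next_step_towards cur target forbidden_targets)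

-- ===== LEMMAS AND PROOFS =====

-- A-side characterisation: first non-forbidden of the stable sort = first minimum of the filter
theorem find?_insertBy (key : Int → Int) (p : Int → Bool) (x : Int) (ys : List Int)
    (h : ys.Pairwise (fun a b => key a ≤ key b)) :
    (PySem.List.insertBy (fun a b => decide (key a < key b)) x ys).find? p =
      if p x then
        (match ys.find? p with
         | none => some x
         | some m => if key x < key m then some x else some m)
      else ys.find? p := by
  induction ys with
  | nil =>
    by_cases hpx : p x <;> simp [PySem.List.insertBy, List.find?, hpx]
  | cons y t ih =>
    rcases List.pairwise_cons.mp h with ⟨hy, ht⟩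
    by_cases hlt : key x < key y
    · have hins : PySem.List.insertBy (fun a b => decide (key a < key b)) x (y :: t)
          = x :: y :: t := by simp [PySem.List.insertBy, hlt]
      rw [hins]
      by_cases hpx : p x
      · rw [List.find?_cons_of_pos hpx, if_pos hpx]
        cases hm : (y :: t).find? p with
        | none => rfl
        | some m =>
          have hmem := List.mem_of_find?_eq_some hm
          have hle : key y ≤ key m := by
            rcases List.mem_cons.mp hmem with rfl | hmt
            · exact le_refl _
            · exact hy m hmt
          simp [lt_of_lt_of_le hlt hle]
      · rw [List.find?_cons_of_neg hpx, if_neg hpx]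
    · have hins : PySem.List.insertBy (fun a b => decide (key a < key b)) x (y :: t)
          = y :: PySem.List.insertBy (fun a b => decide (key a < key b)) x t := by
        simp [PySem.List.insertBy, hlt]
      rw [hins]
      by_cases hpy : p y
      · rw [List.find?_cons_of_pos hpy, List.find?_cons_of_pos hpy]
        by_cases hpx : p x <;> simp [hpx, hlt]
      · rw [List.find?_cons_of_neg hpy, List.find?_cons_of_neg hpy]
        exact ih ht

theorem min?_append_singleton (key : Int → Int) (l : List Int) (x : Int) :
    PySem.List.min? (l ++ [x]) key =
      match PySem.List.min? l key with
      | none => some x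
      | some m => if key x < key m then some x else some m := by
  cases h : PySem.List.min? l key with
  | none =>
    unfold PySem.List.min? at h ⊢
    rw [List.foldl_append, List.foldl_cons, List.foldl_nil, h]
  | some m =>
    unfold PySem.List.min? at h ⊢
    rw [List.foldl_append, List.foldl_cons, List.foldl_nil, h]

theorem find?_sorted_eq_min?_filter (key : Int → Int) (p : Int → Bool) (l : List Int) :
    (PySem.List.sorted l key false).find? p = PySem.List.min? (l.filter p) key := by
  induction l using List.reverseRecOn with
  | nil => simp [PySem.List.sorted, PySem.List.min?]
  | append_singleton l x ih =>
    have hs : PySem.List.sorted (l ++ [x]) key false =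
        PySem.List.insertBy (fun a b => decide (key a < key b)) x (PySem.List.sorted l key false) := by
      rw [PySem.List.sorted_eq_foldl_insertBy, PySem.List.sorted_eq_foldl_insertBy, List.foldl_append]
      rfl
    rw [hs, find?_insertBy key p x _ (PySem.List.sorted_pairwise l key), ih]
    by_cases hpx : p x
    · rw [if_pos hpx]
      have hf : (l ++ [x]).filter p = l.filter p ++ [x] := by simp [List.filter_append, hpx]
      rw [hf, min?_append_singleton]
    · rw [if_neg hpx]
      have hf : (l ++ [x]).filter p = l.filter p := by simp [List.filter_append, hpx]
      rw [hf]

theorem find?_true_eq_min? (key : Int → Int) (l : List Int) :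
    (PySem.List.sorted l key false).find? (fun _ => true) = PySem.List.min? l key := by
  simpa using find?_sorted_eq_min?_filter key (fun _ => true) l

-- B-side: the running-minimum update of one accumulator
def minUpd (k : Int → Int) (acc : Option (Int × Int)) (j : Int) : Option (Int × Int) :=
  match acc with
  | none => some (k j, j)
  | some b => if k j < b.1 || (k j == b.1 && j < b.2) then some (k j, j) else some b

-- A fold of a pairwise-independent step splits into two folds
theorem foldl_prod_split {α β γ : Type} (f : α × β → γ → α × β) (g : α → γ → α) (h : β → γ → β)
    (hf : ∀ st j, f st j = (g st.1 j, h st.2 j)) :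
    ∀ (l : List γ) (a : α) (b : β), l.foldl f (a, b) = (l.foldl g a, l.foldl h b) := by
  intro l
  induction l with
  | nil => intro a b; rfl
  | cons x t ih => intro a b; simp [hf, ih]

-- conditional update = fold over the filtered list
theorem foldl_if_filter {α γ : Type} (q : γ → Bool) (g : α → γ → α) :
    ∀ (l : List γ) (a : α),
      l.foldl (fun acc j => if q j then g acc j else acc) a = (l.filter q).foldl g a := by
  intro l
  induction l with
  | nil => intro a; rfl
  | cons x t ih =>
    intro a
    by_cases hq : q x = true <;> simp [hq, ih]

-- the running minimum over a strictly increasing list is PySem's first-minimum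
theorem foldl_minUpd_eq_min? (k : Int → Int) (l : List Int)
    (hl : l.Pairwise (fun a b => a < b)) :
    l.foldl (minUpd k) none = (PySem.List.min? l k).map (fun m => (k m, m)) := by
  induction l using List.reverseRecOn with
  | nil => simp [PySem.List.min?]
  | append_singleton l x ih =>
    have hl' : l.Pairwise (fun a b => a < b) := hl.sublist (List.sublist_append_left l [x])
    have hxall : ∀ a ∈ l, a < x := by
      intro a ha
      have := List.pairwise_append.mp hl
      exact this.2.2 a ha x (List.mem_singleton_self x)
    rw [List.foldl_append, List.foldl_cons, List.foldl_nil, ih hl', min?_append_singleton]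
    cases hm : PySem.List.min? l k with
    | none => simp [minUpd]
    | some m =>
      have hmx : ¬ x < m := not_lt_of_gt (hxall m (PySem.List.min?_mem hm))
      by_cases hlt : k x < k m
      · simp [minUpd, hlt]
      · simp [minUpd, hlt, hmx]

-- B's fused fold computes the two first-minima directly
theorem alt_eq (cur target : Int) (forb : Option (List Int)) :
    next_step_towards_alt cur target forb =
      (match PySem.List.min? ((neighbors cur).filter (fun c => !((forb.getD []).contains c)))
          (fun x => manhattan x target) with
       | some m => m
       | none =>
         match PySem.List.min? (neighbors cur) (fun x => manhattan x target) with
         | some m => m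
         | none => cur) := by
  unfold next_step_towards_alt
  dsimp only
  rw [foldl_prod_split _
      (fun (a : Option (Int × Int)) (j : Int) =>
        if (j == cur || !(manhattan cur j == 1)) then a
        else if !((forb.getD []).contains j) then minUpd (fun x => manhattan x target) a j else a)
      (fun (b : Option (Int × Int)) (j : Int) =>
        if (j == cur || !(manhattan cur j == 1)) then b
        else minUpd (fun x => manhattan x target) b j)
      (by
        intro st j
        by_cases h : (j == cur || !(manhattan cur j == 1)) = true <;>
          simp [h, minUpd])]
  have hnb : ∀ j : Int, (!(j == cur || !(manhattan cur j == 1))) = (is_adj cur j && !(j == cur)) := by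
    intro j
    by_cases h : j = cur
    · simp [h, is_adj]
    · by_cases hm : manhattan cur j = 1 <;> simp [is_adj, Ne.symm h, hm]
  have hG : (fun (a : Option (Int × Int)) (j : Int) =>
        if (j == cur || !(manhattan cur j == 1)) then a
        else if !((forb.getD []).contains j) then minUpd (fun x => manhattan x target) a j else a)
      = (fun (a : Option (Int × Int)) (j : Int) =>
        if (!((forb.getD []).contains j) && (is_adj cur j && !(j == cur))) then
          minUpd (fun x => manhattan x target) a j else a) := by
    funext a j
    rw [← hnb j]
    by_cases h1 : (j == cur || !(manhattan cur j == 1)) = true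
    · simp [h1]
    · by_cases h2 : (!((forb.getD []).contains j)) = true <;> simp [h1, h2]

  have hH : (fun (b : Option (Int × Int)) (j : Int) =>
        if (j == cur || !(manhattan cur j == 1)) then b
        else minUpd (fun x => manhattan x target) b j)
      = (fun (b : Option (Int × Int)) (j : Int) =>
        if (is_adj cur j && !(j == cur)) then minUpd (fun x => manhattan x target) b j else b) := by
    funext b j
    rw [← hnb j]
    by_cases h1 : (j == cur || !(manhattan cur j == 1)) = true <;> simp [h1]
  rw [hG, hH, foldl_if_filter, foldl_if_filter]
  have hrangepw : (PySem.List.pyRange 1 26 1).Pairwise (fun a b : Int => a < b) := by decide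
  have hall : (PySem.List.pyRange 1 26 1).filter
        (fun j => !((forb.getD []).contains j) && (is_adj cur j && !(j == cur)))
      = (neighbors cur).filter (fun c => !((forb.getD []).contains c)) := by
    unfold neighbors
    rw [List.filter_filter]
  rw [hall]
  have hnbl : (PySem.List.pyRange 1 26 1).filter (fun j => is_adj cur j && !(j == cur))
      = neighbors cur := rfl
  rw [hnbl]
  have hpw1 : ((neighbors cur).filter (fun c => !((forb.getD []).contains c))).Pairwise
      (fun a b : Int => a < b) := ((hrangepw.filter _).filter _)
  have hpw2 : (neighbors cur).Pairwise (fun a b : Int => a < b) := hrangepw.filter _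
  rw [foldl_minUpd_eq_min? _ _ hpw1, foldl_minUpd_eq_min? _ _ hpw2]
  cases PySem.List.min? ((neighbors cur).filter (fun c => !((forb.getD []).contains c)))
      (fun x => manhattan x target) with
  | some m => rfl
  | none =>
    cases PySem.List.min? (neighbors cur) (fun x => manhattan x target) with
    | some m => rfl
    | none => rfl

-- ===== VERDICT (by name: the statement is the Claim_ definition above) =====
theorem next_step_towards_spec : Claim_equal_next_step_towards := by
  intro cur target forb _
  unfold Spec_next_step_towards next_step_towards
  rw [alt_eq]
  dsimp only
  rw [find?_sorted_eq_min?_filter (fun x => manhattan x target)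
      (fun nb => !(forb.getD []).contains nb) (neighbors cur)]
  cases hm : PySem.List.min?
      ((neighbors cur).filter (fun nb => !(forb.getD []).contains nb))
      (fun x => manhattan x target) with
  | some m => rfl
  | none =>
    by_cases hc : neighbors cur = []
    · have hs : PySem.List.sorted (neighbors cur) (fun x => manhattan x target) false = [] :=
        (PySem.List.sorted_eq_nil_iff _ _ _).mpr hc
      have hmc : PySem.List.min? (neighbors cur) (fun x => manhattan x target) = none :=
        (PySem.List.min?_eq_none_iff _ _).mpr hc
      simp [hs, hmc]
    · have hs : PySem.List.sorted (neighbors cur) (fun x => manhattan x target) false ≠ [] := by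
        intro h; exact hc ((PySem.List.sorted_eq_nil_iff _ _ _).mp h)
      cases hmc : PySem.List.min? (neighbors cur) (fun x => manhattan x target) with
      | none => exact absurd ((PySem.List.min?_eq_none_iff _ _).mp hmc) hc
      | some m2 =>
        have hkey := find?_true_eq_min? (fun x => manhattan x target) (neighbors cur)
        rw [hmc] at hkey
        have hhead : (PySem.List.sorted (neighbors cur) (fun x => manhattan x target) false).head?
            = some m2 := by
          rw [← hkey]
          obtain ⟨a, t, he⟩ := List.exists_cons_of_ne_nil hs
          rw [he]
          simp [List.find?]
        have hh : (PySem.List.sorted (neighbors cur) (fun x => manhattan x target) false).head hs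
            = m2 := by
          have := List.head?_eq_some_head hs
          rw [hhead] at this
          exact (Option.some.inj this).symm
        rw [dif_neg hs, hh]
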